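-- pv_equiv track=rewrite | github.com/cyphid/Battle-Room-pilot-Hunter | modules/PreferLargerSpacesModule.py | flood_fill_count
-- ===== SOURCE A (Python) =====
-- def flood_fill_count(start, occupied, board_width, board_height):
--     # Initialize flood fill stack with start position and visited set
--     stack = [start]
--     visited = set()
--
--     # Perform flood fill and count accessible spaces
--     while stack:
--         x, y = stack.pop()
--         if (x, y) in visited or (x, y) in occupied or x < 0 or y < 0 or x >= board_width or y >= board_height:
--             continue
--         visited.add((x, y))
--         # Add adjacent positions
--         stack.extend([(x + dx, y + dy) for dx, dy in [(0, -1), (0, 1), (-1, 0), (1, 0)]])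
--
--     return len(visited)
-- ===== SOURCE B (Python) =====
-- def flood_fill_count(start, occupied, board_width, board_height):
--     occ = set(occupied)
--
--     def free(c):
--         x, y = c
--         return 0 <= x < board_width and 0 <= y < board_height and c not in occ
--
--     if not free(start):
--         return 0
--     visited = {start}
--     queue = [start]
--     head = 0
--     while head < len(queue):
--         x, y = queue[head]
--         head += 1
--         for n in ((x, y - 1), (x, y + 1), (x - 1, y), (x + 1, y)):
--             if free(n) and n not in visited:
--                 visited.add(n)
--                 queue.append(n)
--     return len(visited)
-- ===== Notes on version B (the rewrite author's own statement) =====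
-- stated objective: alternative
-- what changed: B replaces A's mark-on-pop DFS stack (which re-pushes and re-checks duplicate and invalid cells) with a FIFO BFS that hashes occupied into a set once, validates neighbours before enqueueing and marks cells visited at enqueue time, so each cell enters the queue at most once; an early guard returns 0 for an invalid start.
import Mathlib
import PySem

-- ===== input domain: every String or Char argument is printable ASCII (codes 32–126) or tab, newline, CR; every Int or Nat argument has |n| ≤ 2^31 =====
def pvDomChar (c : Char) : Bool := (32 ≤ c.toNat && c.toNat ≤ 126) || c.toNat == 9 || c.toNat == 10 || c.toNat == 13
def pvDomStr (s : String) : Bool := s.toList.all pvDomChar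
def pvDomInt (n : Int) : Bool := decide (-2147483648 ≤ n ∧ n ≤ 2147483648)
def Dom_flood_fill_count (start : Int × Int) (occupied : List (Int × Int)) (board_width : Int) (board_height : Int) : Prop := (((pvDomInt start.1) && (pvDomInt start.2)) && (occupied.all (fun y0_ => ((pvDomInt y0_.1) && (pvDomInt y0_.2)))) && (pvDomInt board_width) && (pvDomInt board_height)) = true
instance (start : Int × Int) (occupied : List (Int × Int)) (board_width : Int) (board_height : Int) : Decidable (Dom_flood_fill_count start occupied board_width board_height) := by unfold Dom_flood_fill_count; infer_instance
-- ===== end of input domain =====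

-- B replaces A's mark-on-pop DFS stack with a mark-on-enqueue FIFO BFS over pre-validated
-- neighbours (occupied hashed into a set once, early 0-return for an invalid start); same
-- return value everywhere (alternative decomposition, no speed claim).

-- all in-bounds cells that are not occupied (used only in the termination measures)
def pvCellsFree (occupied : List (Int × Int)) (board_width board_height : Int) : List (Int × Int) :=
  (((List.range board_width.toNat).flatMap
      (fun x => (List.range board_height.toNat).map (fun y => (Int.ofNat x, Int.ofNat y)))).filter
    (fun c => !(occupied.contains c)))

-- number of free cells not yet visited (termination measure component)
def pvUv (occupied : List (Int × Int)) (board_width board_height : Int)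
    (v : List (Int × Int)) : Nat :=
  ((pvCellsFree occupied board_width board_height).filter (fun c => !(v.contains c))).length

theorem pvMem_cellsFree {occupied : List (Int × Int)} {board_width board_height : Int}
    {c : Int × Int} (h1 : c ∉ occupied) (h2 : 0 ≤ c.1) (h3 : c.1 < board_width)
    (h4 : 0 ≤ c.2) (h5 : c.2 < board_height) :
    c ∈ pvCellsFree occupied board_width board_height := by
  have e3 : (Int.ofNat c.1.toNat, Int.ofNat c.2.toNat) = c := by
    obtain ⟨x, y⟩ := c; simp only [Prod.mk.injEq, Int.ofNat_eq_natCast]; constructor <;> omega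
  apply List.mem_filter.mpr
  have m1 : c.1.toNat ∈ List.range board_width.toNat := List.mem_range.mpr (by omega)
  have m2 : c.2.toNat ∈ List.range board_height.toNat := List.mem_range.mpr (by omega)
  refine ⟨List.mem_flatMap.mpr ⟨c.1.toNat, m1, List.mem_map.mpr ⟨c.2.toNat, m2, e3⟩⟩, ?_⟩
  simp [List.contains_eq_mem, h1]

theorem pvUv_add_lt (occupied : List (Int × Int)) (board_width board_height : Int)
    (v : List (Int × Int)) (c : Int × Int)
    (hmem : c ∈ pvCellsFree occupied board_width board_height) (hnv : c ∉ v) :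
    pvUv occupied board_width board_height (PySem.Set.add v c) <
      pvUv occupied board_width board_height v := by
  unfold pvUv
  have h1 : (pvCellsFree occupied board_width board_height).filter
      (fun x => !(List.contains (PySem.Set.add v c) x))
      = ((pvCellsFree occupied board_width board_height).filter
          (fun x => !(List.contains v x))).filter (fun x => !(x == c)) := by
    rw [List.filter_filter]
    apply List.filter_congr
    intro x _
    by_cases hxv : x ∈ v <;> by_cases hxc : x = c <;>
      simp [List.contains_eq_mem, PySem.Set.mem_add, hxv, hxc]
  rw [h1]
  apply List.length_filter_lt_length_iff_exists.mpr
  refine ⟨c, ?_, by simp⟩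
  simp [List.mem_filter, hmem, List.contains_eq_mem, hnv]

-- ===== PORT A =====
-- while stack: pop; skip if visited/occupied/out of bounds; else mark visited, push 4 neighbours
def floodLoop (occupied : List (Int × Int)) (board_width board_height : Int)
    (stack : List (Int × Int)) (visited : PySem.Set (Int × Int)) : PySem.Set (Int × Int) :=
  if hs : stack = [] then visited
  else
    if h2 : visited.contains (stack.getLast hs) || occupied.contains (stack.getLast hs) ||
        decide ((stack.getLast hs).1 < 0) || decide ((stack.getLast hs).2 < 0) ||
        decide (board_width ≤ (stack.getLast hs).1) ||
        decide (board_height ≤ (stack.getLast hs).2) then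
      floodLoop occupied board_width board_height stack.dropLast visited
    else
      floodLoop occupied board_width board_height
        (stack.dropLast ++ [((stack.getLast hs).1, (stack.getLast hs).2 - 1),
          ((stack.getLast hs).1, (stack.getLast hs).2 + 1),
          ((stack.getLast hs).1 - 1, (stack.getLast hs).2),
          ((stack.getLast hs).1 + 1, (stack.getLast hs).2)])
        (visited.add (stack.getLast hs))
termination_by 5 * pvUv occupied board_width board_height visited + stack.length
decreasing_by
  · have h1 : stack.dropLast.length = stack.length - 1 := List.length_dropLast
    have h2 : 0 < stack.length := List.length_pos_iff.mpr hs
    omega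
  · have hlen : stack.dropLast.length = stack.length - 1 := List.length_dropLast
    have hpos : 0 < stack.length := List.length_pos_iff.mpr hs
    simp only [Bool.or_eq_true, decide_eq_true_eq, not_or, Bool.not_eq_true] at h2
    obtain ⟨⟨⟨⟨⟨hv, hocc⟩, hx0⟩, hy0⟩, hxw⟩, hyh⟩ := h2
    have hnv : stack.getLast hs ∉ visited := by
      intro h; rw [(PySem.Set.contains_iff visited _).mpr h] at hv; cases hv
    have hno : stack.getLast hs ∉ occupied := by
      intro h; rw [List.contains_eq_mem, decide_eq_true h] at hocc; cases hocc
    have hc : pvUv occupied board_width board_height (visited.add (stack.getLast hs)) <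
        pvUv occupied board_width board_height visited :=
      pvUv_add_lt _ _ _ _ _ (pvMem_cellsFree hno (by omega) (by omega) (by omega) (by omega)) hnv
    simp only [List.length_append, List.length_cons, List.length_nil]
    omega

def flood_fill_count (start : Int × Int) (occupied : List (Int × Int)) (board_width : Int) (board_height : Int) : Int :=
  ((floodLoop occupied board_width board_height [start] PySem.Set.empty).length : Int)

-- ===== PORT B =====
-- free(c): 0 <= x < board_width and 0 <= y < board_height and c not in occ (occ = set(occupied))
def pvFreeB (occS : PySem.Set (Int × Int)) (board_width board_height : Int)
    (c : Int × Int) : Bool :=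
  decide (0 ≤ c.1) && decide (c.1 < board_width) && decide (0 ≤ c.2) &&
    decide (c.2 < board_height) && !(occS.contains c)

-- inner for-loop body: validate a neighbour, then mark + enqueue it
def bfsStep (occS : PySem.Set (Int × Int)) (board_width board_height : Int)
    (vq : PySem.Set (Int × Int) × List (Int × Int)) (n : Int × Int) :
    PySem.Set (Int × Int) × List (Int × Int) :=
  if pvFreeB occS board_width board_height n && !(vq.1.contains n) then
    (PySem.Set.add vq.1 n, vq.2 ++ [n])
  else vq

-- termination bookkeeping for the 4-neighbour fold
theorem bfsFold_measure (occupied : List (Int × Int)) (board_width board_height : Int)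
    (ns : List (Int × Int)) : ∀ v acc,
    2 * pvUv occupied board_width board_height
        (ns.foldl (bfsStep (PySem.Set.ofList occupied) board_width board_height) (v, acc)).1 +
      (ns.foldl (bfsStep (PySem.Set.ofList occupied) board_width board_height) (v, acc)).2.length ≤
      2 * pvUv occupied board_width board_height v + acc.length := by
  induction ns with
  | nil => intro v acc; simp
  | cons n ns ih =>
    intro v acc
    simp only [List.foldl_cons]
    have hs : bfsStep (PySem.Set.ofList occupied) board_width board_height (v, acc) n
        = ((bfsStep (PySem.Set.ofList occupied) board_width board_height (v, acc) n).1,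
           (bfsStep (PySem.Set.ofList occupied) board_width board_height (v, acc) n).2) := rfl
    have ih' := ih (bfsStep (PySem.Set.ofList occupied) board_width board_height (v, acc) n).1
      (bfsStep (PySem.Set.ofList occupied) board_width board_height (v, acc) n).2
    rw [← hs] at ih'
    refine le_trans ih' ?_
    unfold bfsStep
    split_ifs with hc
    · simp only [Bool.and_eq_true, Bool.not_eq_true'] at hc
      obtain ⟨hfree, hnvb⟩ := hc
      have hnv : n ∉ v := by
        intro h; rw [(PySem.Set.contains_iff v n).mpr h] at hnvb; cases hnvb
      have hmem : n ∈ pvCellsFree occupied board_width board_height := by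
        unfold pvFreeB at hfree
        simp only [Bool.and_eq_true, decide_eq_true_eq, Bool.not_eq_true'] at hfree
        obtain ⟨⟨⟨⟨hx0, hxw⟩, hy0⟩, hyh⟩, hob⟩ := hfree
        have hno : n ∉ occupied := by
          intro h
          rw [(PySem.Set.contains_iff _ n).mpr ((PySem.Set.mem_ofList _ _).mpr h)] at hob
          cases hob
        exact pvMem_cellsFree hno hx0 hxw hy0 hyh
      have hlt := pvUv_add_lt occupied board_width board_height v n hmem hnv
      simp only [List.length_append, List.length_cons, List.length_nil]
      omega
    · simp

-- while queue: pop front; for each of the 4 neighbours, if free and unvisited: mark + enqueue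
def bfsLoop (occupied : List (Int × Int)) (board_width board_height : Int)
    (visited : PySem.Set (Int × Int)) (queue : List (Int × Int)) : PySem.Set (Int × Int) :=
  match queue with
  | [] => visited
  | c :: rest =>
    let r := [(c.1, c.2 - 1), (c.1, c.2 + 1), (c.1 - 1, c.2), (c.1 + 1, c.2)].foldl
      (bfsStep (PySem.Set.ofList occupied) board_width board_height) (visited, [])
    bfsLoop occupied board_width board_height r.1 (rest ++ r.2)
termination_by 2 * pvUv occupied board_width board_height visited + queue.length
decreasing_by
  have h := bfsFold_measure occupied board_width board_height
    [(c.1, c.2 - 1), (c.1, c.2 + 1), (c.1 - 1, c.2), (c.1 + 1, c.2)] visited []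
  simp only [List.length_append, List.length_cons, List.length_nil] at h ⊢
  omega

def flood_fill_count_alt (start : Int × Int) (occupied : List (Int × Int)) (board_width : Int) (board_height : Int) : Int :=
  if pvFreeB (PySem.Set.ofList occupied) board_width board_height start then
    ((bfsLoop occupied board_width board_height
        (PySem.Set.add PySem.Set.empty start) [start]).length : Int)
  else 0

-- ===== PRECONDITION & SPEC =====
def Spec_flood_fill_count (start : Int × Int) (occupied : List (Int × Int)) (board_width : Int) (board_height : Int) (out : Int) : Prop := out = flood_fill_count_alt start occupied board_width board_height
instance (start : Int × Int) (occupied : List (Int × Int)) (board_width : Int) (board_height : Int) (out : Int) : Decidable (Spec_flood_fill_count start occupied board_width board_height out) := by unfold Spec_flood_fill_count; infer_instance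

-- ===== CLAIM (what is proved, stated in full; the proofs are below) =====
def Claim_equal_flood_fill_count : Prop := ∀ (start : Int × Int) (occupied : List (Int × Int)) (board_width : Int) (board_height : Int), Dom_flood_fill_count start occupied board_width board_height → Spec_flood_fill_count start occupied board_width board_height (flood_fill_count start occupied board_width board_height)

-- ===== LEMMAS AND PROOFS =====

-- a cell is free: not occupied and inside the board
def pvFree (occupied : List (Int × Int)) (board_width board_height : Int) (c : Int × Int) : Prop :=
  c ∉ occupied ∧ 0 ≤ c.1 ∧ c.1 < board_width ∧ 0 ≤ c.2 ∧ c.2 < board_height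

def pvAdj (c d : Int × Int) : Prop :=
  d = (c.1, c.2 - 1) ∨ d = (c.1, c.2 + 1) ∨ d = (c.1 - 1, c.2) ∨ d = (c.1 + 1, c.2)

-- reachability through free cells (every node on the path is free)
inductive pvRF (occupied : List (Int × Int)) (board_width board_height : Int) :
    (Int × Int) → (Int × Int) → Prop
  | refl (c : Int × Int) : pvFree occupied board_width board_height c →
      pvRF occupied board_width board_height c c
  | head (c d e : Int × Int) : pvFree occupied board_width board_height c → pvAdj c d →
      pvRF occupied board_width board_height d e → pvRF occupied board_width board_height c e

theorem pvRF_free_left {occupied : List (Int × Int)} {board_width board_height : Int}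
    {c d : Int × Int} (h : pvRF occupied board_width board_height c d) :
    pvFree occupied board_width board_height c := by
  cases h <;> assumption

theorem pvRF_snoc {occupied : List (Int × Int)} {board_width board_height : Int}
    {a b d : Int × Int} (h : pvRF occupied board_width board_height a b) (hadj : pvAdj b d)
    (hd : pvFree occupied board_width board_height d) :
    pvRF occupied board_width board_height a d := by
  induction h with
  | refl c hc => exact pvRF.head c d d hc hadj (pvRF.refl d hd)
  | head c e f hc hadj' _ ih => exact pvRF.head c e d hc hadj' (ih hadj)

theorem pvRF_closed {occupied : List (Int × Int)} {board_width board_height : Int}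
    {V : List (Int × Int)}
    (hcl : ∀ v ∈ V, ∀ n, pvAdj v n → pvFree occupied board_width board_height n → n ∈ V)
    {a c : Int × Int} (h : pvRF occupied board_width board_height a c) (ha : a ∈ V) : c ∈ V := by
  induction h with
  | refl => exact ha
  | head x d e _ hadj hrf ih => exact ih (hcl x ha d hadj (pvRF_free_left hrf))

theorem pvAdj_mem_list {c d : Int × Int} (h : pvAdj c d) :
    d ∈ [(c.1, c.2 - 1), (c.1, c.2 + 1), (c.1 - 1, c.2), (c.1 + 1, c.2)] := by
  rcases h with h | h | h | h <;> simp [h]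


theorem pvAdj_of_mem_list {c d : Int × Int}
    (h : d ∈ [(c.1, c.2 - 1), (c.1, c.2 + 1), (c.1 - 1, c.2), (c.1 + 1, c.2)]) : pvAdj c d := by
  unfold pvAdj
  simp only [List.mem_cons, List.not_mem_nil, or_false] at h
  tauto

theorem pvFreeB_iff {occupied : List (Int × Int)} {board_width board_height : Int}
    {c : Int × Int} :
    pvFreeB (PySem.Set.ofList occupied) board_width board_height c = true ↔
      pvFree occupied board_width board_height c := by
  unfold pvFreeB pvFree
  simp only [Bool.and_eq_true, decide_eq_true_eq, Bool.not_eq_true',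
    ← Bool.not_eq_true, PySem.Set.contains_iff, PySem.Set.mem_ofList]
  tauto

-- invariant of A's flood-fill loop: it returns exactly the cells reachable from s0
theorem floodLoop_spec (occupied : List (Int × Int)) (board_width board_height : Int)
    (s0 : Int × Int) :
    ∀ (stack : List (Int × Int)) (visited : PySem.Set (Int × Int)),
    visited.Nodup →
    (∀ c ∈ visited, pvRF occupied board_width board_height s0 c) →
    (∀ c ∈ stack, pvFree occupied board_width board_height c →
      pvRF occupied board_width board_height s0 c) →
    (∀ v ∈ visited, ∀ n, pvAdj v n → pvFree occupied board_width board_height n →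
      n ∈ visited ∨ n ∈ stack) →
    (pvFree occupied board_width board_height s0 → s0 ∈ visited ∨ s0 ∈ stack) →
    (floodLoop occupied board_width board_height stack visited).Nodup ∧
      (∀ c, c ∈ floodLoop occupied board_width board_height stack visited ↔
        pvRF occupied board_width board_height s0 c) := by
  intro stack visited
  induction stack, visited using floodLoop.induct occupied board_width board_height with
  | case1 visited =>
    intro hn ha _ hcl hd
    rw [floodLoop]
    refine ⟨hn, fun c => ⟨ha c, fun hr => ?_⟩⟩
    have hcl' : ∀ v ∈ visited, ∀ n, pvAdj v n → pvFree occupied board_width board_height n →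
        n ∈ visited := by
      intro v hv n h1 h2
      rcases hcl v hv n h1 h2 with h | h
      · exact h
      · cases h
    have hs0 : s0 ∈ visited := by
      rcases hd (pvRF_free_left hr) with h | h
      · exact h
      · cases h
    exact pvRF_closed hcl' hr hs0
  | case2 stack visited hs h2 ih =>
    intro hn ha hb hcl hd
    rw [floodLoop]
    simp only [dif_neg hs, dif_pos h2]
    have hsplit := List.dropLast_append_getLast hs
    have h2' := h2
    simp only [Bool.or_eq_true, decide_eq_true_eq, PySem.Set.contains_iff,
      List.contains_eq_mem, decide_eq_true_eq] at h2'
    have hlastv : stack.getLast hs ∈ visited ∨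
        ¬ pvFree occupied board_width board_height (stack.getLast hs) := by
      unfold pvFree
      rcases h2' with ((((h | h) | h) | h) | h) | h
      · exact Or.inl h
      · exact Or.inr fun hf => hf.1 h
      · exact Or.inr fun hf => by have := hf.2.1; omega
      · exact Or.inr fun hf => by have := hf.2.2.2.1; omega
      · exact Or.inr fun hf => by have := hf.2.2.1; omega
      · exact Or.inr fun hf => by have := hf.2.2.2.2; omega
    apply ih hn ha
    · intro c hc hf
      exact hb c (hsplit ▸ List.mem_append_left _ hc) hf
    · intro v hv n h1 hf
      rcases hcl v hv n h1 hf with h | h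
      · exact Or.inl h
      · rw [← hsplit] at h
        rcases List.mem_append.mp h with h | h
        · exact Or.inr h
        · simp only [List.mem_singleton] at h
          subst h
          rcases hlastv with h' | h'
          · exact Or.inl h'
          · exact absurd hf h'
    · intro hf
      rcases hd hf with h | h
      · exact Or.inl h
      · rw [← hsplit] at h
        rcases List.mem_append.mp h with h | h
        · exact Or.inr h
        · simp only [List.mem_singleton] at h
          rw [h]
          rcases hlastv with h' | h'
          · exact Or.inl h'
          · exact absurd (h ▸ hf) h'
  | case3 stack visited hs h2 ih =>
    intro hn ha hb hcl hd
    rw [floodLoop]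
    simp only [dif_neg hs, dif_neg h2]
    have hsplit := List.dropLast_append_getLast hs
    simp only [Bool.or_eq_true, decide_eq_true_eq, not_or, Bool.not_eq_true] at h2
    obtain ⟨⟨⟨⟨⟨hv, hocc⟩, hx0⟩, hy0⟩, hxw⟩, hyh⟩ := h2
    have hnv : stack.getLast hs ∉ visited := by
      intro h; rw [(PySem.Set.contains_iff visited _).mpr h] at hv; cases hv
    have hno : stack.getLast hs ∉ occupied := by
      intro h; rw [List.contains_eq_mem, decide_eq_true h] at hocc; cases hocc
    have hfreec : pvFree occupied board_width board_height (stack.getLast hs) :=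
      ⟨hno, by omega, by omega, by omega, by omega⟩
    have hrfc : pvRF occupied board_width board_height s0 (stack.getLast hs) :=
      hb _ (List.getLast_mem hs) hfreec
    apply ih (PySem.Set.nodup_add _ _ hn)
    · intro c hc
      rcases (PySem.Set.mem_add _ _ _).mp hc with h | h
      · exact ha c h
      · exact h ▸ hrfc
    · intro c hc hf
      rcases List.mem_append.mp hc with h | h
      · exact hb c (hsplit ▸ List.mem_append_left _ h) hf
      · exact pvRF_snoc hrfc (pvAdj_of_mem_list h) hf
    · intro v hv' n h1 hf
      rcases (PySem.Set.mem_add _ _ _).mp hv' with h | h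
      · rcases hcl v h n h1 hf with h' | h'
        · exact Or.inl ((PySem.Set.mem_add _ _ _).mpr (Or.inl h'))
        · rw [← hsplit] at h'
          rcases List.mem_append.mp h' with h'' | h''
          · exact Or.inr (List.mem_append_left _ h'')
          · simp only [List.mem_singleton] at h''
            exact Or.inl ((PySem.Set.mem_add _ _ _).mpr (Or.inr h''))
      · subst h
        exact Or.inr (List.mem_append_right _ (pvAdj_mem_list h1))
    · intro hf
      rcases hd hf with h | h
      · exact Or.inl ((PySem.Set.mem_add _ _ _).mpr (Or.inl h))
      · rw [← hsplit] at h
        rcases List.mem_append.mp h with h' | h'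
        · exact Or.inr (List.mem_append_left _ h')
        · simp only [List.mem_singleton] at h'
          exact Or.inl ((PySem.Set.mem_add _ _ _).mpr (Or.inr h'))

-- what the 4-neighbour fold of B does to visited and to the enqueued batch
theorem bfsFold_invs (occupied : List (Int × Int)) (board_width board_height : Int)
    (ns : List (Int × Int)) : ∀ (v : PySem.Set (Int × Int)) (acc : List (Int × Int)),
    v.Nodup →
    ((ns.foldl (bfsStep (PySem.Set.ofList occupied) board_width board_height) (v, acc)).1.Nodup ∧
     (∀ x ∈ v, x ∈ (ns.foldl (bfsStep (PySem.Set.ofList occupied) board_width board_height) (v, acc)).1) ∧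
     (∀ x ∈ (ns.foldl (bfsStep (PySem.Set.ofList occupied) board_width board_height) (v, acc)).1,
        x ∈ v ∨ (x ∈ ns ∧ pvFree occupied board_width board_height x)) ∧
     (∀ x ∈ ns, pvFree occupied board_width board_height x →
        x ∈ (ns.foldl (bfsStep (PySem.Set.ofList occupied) board_width board_height) (v, acc)).1) ∧
     (∀ x ∈ (ns.foldl (bfsStep (PySem.Set.ofList occupied) board_width board_height) (v, acc)).2,
        x ∈ acc ∨ x ∈ (ns.foldl (bfsStep (PySem.Set.ofList occupied) board_width board_height) (v, acc)).1) ∧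
     (∀ x ∈ (ns.foldl (bfsStep (PySem.Set.ofList occupied) board_width board_height) (v, acc)).1,
        x ∈ v ∨ x ∈ (ns.foldl (bfsStep (PySem.Set.ofList occupied) board_width board_height) (v, acc)).2) ∧
     (∀ x ∈ acc, x ∈ (ns.foldl (bfsStep (PySem.Set.ofList occupied) board_width board_height) (v, acc)).2)) := by
  induction ns with
  | nil =>
    intro v acc hn
    exact ⟨hn, fun x h => h, fun x h => Or.inl h, by simp, fun x h => Or.inl h,
      fun x h => Or.inl h, fun x h => h⟩
  | cons n ns ih =>
    intro v acc hn
    simp only [List.foldl_cons]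
    by_cases hc : (pvFreeB (PySem.Set.ofList occupied) board_width board_height n &&
        !(PySem.Set.contains v n)) = true
    · have hstep : bfsStep (PySem.Set.ofList occupied) board_width board_height (v, acc) n
          = (PySem.Set.add v n, acc ++ [n]) := by
        unfold bfsStep; rw [if_pos hc]
      rw [hstep]
      simp only [Bool.and_eq_true, Bool.not_eq_true'] at hc
      have hfree : pvFree occupied board_width board_height n := pvFreeB_iff.mp hc.1
      obtain ⟨ihn, ihmono, ihnew, ihall, ihacc, ihnewq, ihaccmono⟩ :=
        ih (PySem.Set.add v n) (acc ++ [n]) (PySem.Set.nodup_add _ _ hn)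
      have hmemn : n ∈ (ns.foldl (bfsStep (PySem.Set.ofList occupied) board_width board_height)
          (PySem.Set.add v n, acc ++ [n])).1 :=
        ihmono n ((PySem.Set.mem_add _ _ _).mpr (Or.inr rfl))
      refine ⟨ihn, ?_, ?_, ?_, ?_, ?_, ?_⟩
      · intro x hx
        exact ihmono x ((PySem.Set.mem_add _ _ _).mpr (Or.inl hx))
      · intro x hx
        rcases ihnew x hx with h | h
        · rcases (PySem.Set.mem_add _ _ _).mp h with h' | h'
          · exact Or.inl h'
          · exact Or.inr ⟨by simp [h'], h' ▸ hfree⟩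
        · exact Or.inr ⟨List.mem_cons_of_mem _ h.1, h.2⟩
      · intro x hx hf
        rcases List.mem_cons.mp hx with h | h
        · subst h
          exact hmemn
        · exact ihall x h hf
      · intro x hx
        rcases ihacc x hx with h | h
        · rcases List.mem_append.mp h with h' | h'
          · exact Or.inl h'
          · simp only [List.mem_singleton] at h'
            exact Or.inr (h' ▸ hmemn)
        · exact Or.inr h
      · intro x hx
        rcases ihnewq x hx with h | h
        · rcases (PySem.Set.mem_add _ _ _).mp h with h' | h'
          · exact Or.inl h'
          · exact Or.inr (h' ▸ ihaccmono n (List.mem_append_right _ (List.mem_singleton.mpr rfl)))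
        · exact Or.inr h
      · intro x hx
        exact ihaccmono x (List.mem_append_left _ hx)
    · have hstep : bfsStep (PySem.Set.ofList occupied) board_width board_height (v, acc) n
          = (v, acc) := by
        unfold bfsStep; rw [if_neg hc]
      rw [hstep]
      obtain ⟨ihn, ihmono, ihnew, ihall, ihacc, ihnewq, ihaccmono⟩ := ih v acc hn
      refine ⟨ihn, ihmono, ?_, ?_, ihacc, ihnewq, ihaccmono⟩
      · intro x hx
        rcases ihnew x hx with h | h
        · exact Or.inl h
        · exact Or.inr ⟨List.mem_cons_of_mem _ h.1, h.2⟩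
      · intro x hx hf
        rcases List.mem_cons.mp hx with h | h
        · subst h
          apply ihmono
          by_contra hxv
          apply hc
          simp only [Bool.and_eq_true, Bool.not_eq_true']
          refine ⟨pvFreeB_iff.mpr hf, ?_⟩
          rw [← Bool.not_eq_true, PySem.Set.contains_iff]
          exact hxv
        · exact ihall x h hf

-- invariant of B's BFS loop: it returns exactly the cells reachable from s0
theorem bfsLoop_spec (occupied : List (Int × Int)) (board_width board_height : Int)
    (s0 : Int × Int) :
    ∀ (queue : List (Int × Int)) (visited : PySem.Set (Int × Int)),
    visited.Nodup →
    (∀ c ∈ visited, pvRF occupied board_width board_height s0 c) →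
    (∀ c ∈ queue, c ∈ visited) →
    (∀ v ∈ visited, v ∈ queue ∨
      (∀ n, pvAdj v n → pvFree occupied board_width board_height n → n ∈ visited)) →
    (pvFree occupied board_width board_height s0 → s0 ∈ visited) →
    (bfsLoop occupied board_width board_height visited queue).Nodup ∧
      (∀ c, c ∈ bfsLoop occupied board_width board_height visited queue ↔
        pvRF occupied board_width board_height s0 c) := by
  intro queue visited
  induction visited, queue using bfsLoop.induct occupied board_width board_height with
  | case1 visited =>
    intro hn ha _ hcl hd
    rw [bfsLoop]
    refine ⟨hn, fun c => ⟨ha c, fun hr => ?_⟩⟩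
    have hcl' : ∀ v ∈ visited, ∀ n, pvAdj v n → pvFree occupied board_width board_height n →
        n ∈ visited := by
      intro v hv
      rcases hcl v hv with h | h
      · cases h
      · exact h
    exact pvRF_closed hcl' hr (hd (pvRF_free_left hr))
  | case2 visited c rest r ih =>
    intro hn ha hq hcl hd
    rw [bfsLoop]
    obtain ⟨fn, fmono, fnew, fall, facc, fnewq, _⟩ := bfsFold_invs occupied board_width
      board_height [(c.1, c.2 - 1), (c.1, c.2 + 1), (c.1 - 1, c.2), (c.1 + 1, c.2)] visited [] hn
    have hcv : c ∈ visited := hq c (List.mem_cons_self ..)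
    have hrfc : pvRF occupied board_width board_height s0 c := ha c hcv
    apply ih fn
    · intro x hx
      rcases fnew x hx with h | h
      · exact ha x h
      · exact pvRF_snoc hrfc (pvAdj_of_mem_list h.1) h.2
    · intro x hx
      rcases List.mem_append.mp hx with h | h
      · exact fmono x (hq x (List.mem_cons_of_mem _ h))
      · rcases facc x h with h' | h'
        · cases h'
        · exact h'
    · intro v hv
      rcases fnew v hv with hvold | _
      · rcases hcl v hvold with h | h
        · rcases List.mem_cons.mp h with h' | h'
          · subst h'
            exact Or.inr (fun n h1 h2 => fall n (pvAdj_mem_list h1) h2)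
          · exact Or.inl (List.mem_append_left _ h')
        · exact Or.inr (fun n h1 h2 => fmono n (h n h1 h2))
      · rcases fnewq v hv with h | h
        · rcases hcl v h with h' | h'
          · rcases List.mem_cons.mp h' with h'' | h''
            · subst h''
              exact Or.inr (fun n h1 h2 => fall n (pvAdj_mem_list h1) h2)
            · exact Or.inl (List.mem_append_left _ h'')
          · exact Or.inr (fun n h1 h2 => fmono n (h' n h1 h2))
        · exact Or.inl (List.mem_append_right _ h)
    · intro hf
      exact fmono s0 (hd hf)

-- ===== VERDICT (by name: the statement is the Claim_ definition above) =====
theorem pvRA_spec (start : Int × Int) (occupied : List (Int × Int))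
    (board_width board_height : Int) :
    (floodLoop occupied board_width board_height [start] PySem.Set.empty).Nodup ∧
      (∀ c, c ∈ floodLoop occupied board_width board_height [start] PySem.Set.empty ↔
        pvRF occupied board_width board_height start c) := by
  apply floodLoop_spec
  · exact List.nodup_nil
  · intro c hc; cases hc
  · intro c hc hf
    rcases List.mem_singleton.mp hc with h
    exact h ▸ pvRF.refl c (h ▸ hf)
  · intro v hv; cases hv
  · intro _; exact Or.inr (List.mem_singleton.mpr rfl)

theorem flood_fill_count_spec : Claim_equal_flood_fill_count := by
  intro start occupied board_width board_height _
  unfold Spec_flood_fill_count flood_fill_count flood_fill_count_alt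
  obtain ⟨hAn, hAm⟩ := pvRA_spec start occupied board_width board_height
  by_cases hfree : pvFreeB (PySem.Set.ofList occupied) board_width board_height start = true
  · rw [if_pos hfree]
    have hfp : pvFree occupied board_width board_height start := pvFreeB_iff.mp hfree
    have hstart : PySem.Set.add PySem.Set.empty start = [start] := rfl
    obtain ⟨hBn, hBm⟩ := bfsLoop_spec occupied board_width board_height start [start]
      (PySem.Set.add PySem.Set.empty start)
      (by rw [hstart]; exact List.nodup_singleton start)
      (by rw [hstart]
          intro c hc
          rcases List.mem_singleton.mp hc with h
          exact h ▸ pvRF.refl c (h ▸ hfp))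
      (by rw [hstart]; exact fun c h => h)
      (by rw [hstart]
          intro v hv
          exact Or.inl hv)
      (by rw [hstart]; intro _; exact List.mem_singleton.mpr rfl)
    have hperm : (floodLoop occupied board_width board_height [start] PySem.Set.empty).Perm
        (bfsLoop occupied board_width board_height (PySem.Set.add PySem.Set.empty start) [start]) := by
      rw [List.perm_ext_iff_of_nodup hAn hBn]
      intro a
      rw [hAm a, hBm a]
    rw [hperm.length_eq]
  · rw [if_neg hfree]
    have hempty : floodLoop occupied board_width board_height [start] PySem.Set.empty = [] := by
      apply List.eq_nil_iff_forall_not_mem.mpr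
      intro c hc
      have hr := (hAm c).mp hc
      exact hfree (pvFreeB_iff.mpr (pvRF_free_left hr))
    rw [hempty]
    rfl
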